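-- pv_equiv track=rewrite | github.com/ASethi04/Generation-of-Novel-Drug-Molecules-with-Specific-Protein-Targets-Through-a-Graph-Network-and-Custom- | CVAE.py | numWrongRing
-- ===== SOURCE A (Python) =====
-- def numWrongRing(string):
--     sum = 0
--     for number in range(20):
--         count= 0
--         for i in range(len(string)):
--             if string[i]==number:
--                 count += 1
--         if(count != 0 and count==1):
--             sum += (count%2)
--         elif(count != 0 and count > 1):
--             sum += (count%2 + (count - 2))
--     return sum
-- ===== SOURCE B (Python) =====
-- def numWrongRing(string):
--     freq = {}
--     for x in string:
--         freq[x] = freq.get(x, 0) + 1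
--     total = 0
--     for key, count in freq.items():
--         if key in range(20):
--             total += count % 2 + max(0, count - 2)
--     return total
-- ===== Notes on version B (the rewrite author's own statement) =====
-- stated objective: simpler
-- what changed: B builds one frequency table in a single pass over the input and sums the penalty over the table's entries filtered to keys in range(20), instead of A's 20 full scans of the list (one per symbol).
import Mathlib
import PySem

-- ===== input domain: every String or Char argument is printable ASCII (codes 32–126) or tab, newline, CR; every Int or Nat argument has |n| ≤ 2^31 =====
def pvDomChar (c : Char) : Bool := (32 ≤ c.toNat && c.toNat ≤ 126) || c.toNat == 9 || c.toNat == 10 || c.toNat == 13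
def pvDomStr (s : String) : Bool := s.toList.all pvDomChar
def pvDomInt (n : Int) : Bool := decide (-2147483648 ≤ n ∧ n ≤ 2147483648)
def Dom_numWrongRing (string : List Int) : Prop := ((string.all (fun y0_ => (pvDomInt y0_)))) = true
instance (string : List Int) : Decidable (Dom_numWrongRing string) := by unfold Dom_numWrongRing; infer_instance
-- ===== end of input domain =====

-- B replaces A's 20 per-symbol scans with one frequency-table pass summed over its entries (same result, different traversal).


-- ===== PORT A =====
-- literal transliteration of A: for number in range(20), scan the whole list counting matches, then add the branchy penalty
def numWrongRing (string : List Int) : Int :=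
  (PySem.List.pyRange 0 20).foldl (fun sum number =>
    let count : Int := (PySem.List.pyRange 0 (PySem.List.len string)).foldl
      (fun c i => if PySem.List.pyGetD string i 0 == number then c + 1 else c) 0
    if count ≠ 0 ∧ count = 1 then sum + PySem.Int.mod count 2
    else if count ≠ 0 ∧ count > 1 then sum + (PySem.Int.mod count 2 + (count - 2))
    else sum) 0

-- ===== PORT B =====
-- literal transliteration of B: one-pass frequency dict, then sum penalties over its items filtered to keys in range(20)
def numWrongRing_alt (string : List Int) : Int :=
  (string.foldl (fun d x => d.insert x (d.getD x 0 + 1))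
      (PySem.Dict.empty : PySem.Dict Int Int)).items.foldl (fun total p =>
    if 0 ≤ p.1 ∧ p.1 < 20 then total + (PySem.Int.mod p.2 2 + max 0 (p.2 - 2)) else total) 0

-- ===== PRECONDITION & SPEC =====
def Spec_numWrongRing (string : List Int) (out : Int) : Prop := out = numWrongRing_alt string
instance (string : List Int) (out : Int) : Decidable (Spec_numWrongRing string out) := by unfold Spec_numWrongRing; infer_instance

-- ===== CLAIM (what is proved, stated in full; the proofs are below) =====
def Claim_equal_numWrongRing : Prop := ∀ (string : List Int), Dom_numWrongRing string → Spec_numWrongRing string (numWrongRing string)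

-- ===== LEMMAS AND PROOFS =====\n-- A's per-symbol penalty (branchy form) and B's per-symbol penalty (mod/max form)
def penA (c : Int) : Int :=
  if c ≠ 0 ∧ c = 1 then PySem.Int.mod c 2
  else if c ≠ 0 ∧ c > 1 then PySem.Int.mod c 2 + (c - 2)
  else 0

def penB (c : Int) : Int := PySem.Int.mod c 2 + max 0 (c - 2)

lemma penA_eq_penB (n : Nat) : penA (n : Int) = penB (n : Int) := by
  have hm : PySem.Int.mod (n : Int) 2 = ((n % 2 : Nat) : Int) := by
    exact_mod_cast PySem.Int.mod_natCast n 2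
  unfold penA penB
  rw [hm]
  split_ifs with h1 h2 <;> push_cast at * <;> omega

-- zero-count symbols contribute nothing
lemma penB_zero : penB 0 = 0 := by decide

-- dropping zero terms: sum over l equals sum over the filtered l when f vanishes off the filter
lemma sum_map_eq_sum_filter (l : List Int) (f : Int → Int) (p : Int → Bool)
    (h : ∀ x ∈ l, p x = false → f x = 0) :
    (l.map f).sum = ((l.filter p).map f).sum := by
  induction l with
  | nil => rfl
  | cons a t ih =>
    have ih' := ih (fun x hx => h x (List.mem_cons_of_mem _ hx))
    by_cases hp : p a = true
    · simp [hp, ih']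
    · have : p a = false := by simpa using hp
      simp [this, h a (List.mem_cons_self) this, ih']

-- A's value as a sum over range(20)
lemma numWrongRing_eq_sum (string : List Int) :
    numWrongRing string =
      ((PySem.List.pyRange 0 20).map (fun k => penB ((string.count k : Int)))).sum := by
  unfold numWrongRing
  have hcnt : ∀ number : Int,
      (PySem.List.pyRange 0 (PySem.List.len string)).foldl
        (fun c i => if PySem.List.pyGetD string i 0 == number then c + 1 else c) (0 : Int)
        = (string.count number : Int) := by
    intro number
    rw [PySem.List.foldl_pyRange_pyGetD string 0
      (fun c v => if v == number then c + 1 else c) 0 (by omega)]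
    simpa using PySem.List.foldl_beq_add_one string number (0 : Int)
  have hcong : (PySem.List.pyRange 0 20).foldl (fun sum number =>
      let count : Int := (PySem.List.pyRange 0 (PySem.List.len string)).foldl
        (fun c i => if PySem.List.pyGetD string i 0 == number then c + 1 else c) 0
      if count ≠ 0 ∧ count = 1 then sum + PySem.Int.mod count 2
      else if count ≠ 0 ∧ count > 1 then sum + (PySem.Int.mod count 2 + (count - 2))
      else sum) 0
      = (PySem.List.pyRange 0 20).foldl
          (fun sum k => sum + penB ((string.count k : Int))) 0 := by
    apply PySem.List.foldl_congr_mem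
    intro acc x _
    simp only [hcnt x]
    rw [← penA_eq_penB]
    unfold penA
    split_ifs <;> simp
  rw [hcong, PySem.List.foldl_add]
  simp

-- B's value as a sum over the distinct keys in range(20)
lemma numWrongRing_alt_eq_sum (string : List Int) :
    numWrongRing_alt string =
      (((PySem.Set.ofList string).filter (fun k => decide (0 ≤ k ∧ k < 20))).map
        (fun k => penB ((string.count k : Int)))).sum := by
  unfold numWrongRing_alt
  rw [PySem.Dict.foldl_insert_getD_add_one_eq_counter, PySem.Dict.items_counter,
    PySem.List.foldl_ite_eq_foldl_filter (fun p : Int × Int => 0 ≤ p.1 ∧ p.1 < 20)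
      (fun total p => total + (PySem.Int.mod p.2 2 + max 0 (p.2 - 2))),
    PySem.List.foldl_add _ (fun p : Int × Int => PySem.Int.mod p.2 2 + max 0 (p.2 - 2))]
  simp only [List.filter_map, List.map_map, Function.comp_def, penB]
  rw [zero_add]

-- the filtered range and the filtered key set are permutations, so the sums agree
lemma sums_agree (string : List Int) :
    ((PySem.List.pyRange 0 20).map (fun k => penB ((string.count k : Int)))).sum =
      (((PySem.Set.ofList string).filter (fun k => decide (0 ≤ k ∧ k < 20))).map
        (fun k => penB ((string.count k : Int)))).sum := by
  rw [sum_map_eq_sum_filter (PySem.List.pyRange 0 20) _ (fun k => decide (k ∈ string))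
    (by
      intro x _ hx
      have hx' : x ∉ string := by simpa using hx
      have : string.count x = 0 := List.count_eq_zero.mpr hx'
      simp [this, penB_zero])]
  have hperm : ((PySem.List.pyRange 0 20).filter (fun k => decide (k ∈ string))).Perm
      ((PySem.Set.ofList string).filter (fun k => decide (0 ≤ k ∧ k < 20))) := by
    rw [List.perm_ext_iff_of_nodup
      ((PySem.List.nodup_pyRange_one 0 20).filter _)
      ((PySem.Set.nodup_ofList string).filter _)]
    intro a
    simp [List.mem_filter, PySem.List.mem_pyRange_one, PySem.Set.mem_ofList, and_comm]
  exact (hperm.map _).sum_eq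

-- ===== VERDICT (by name: the statement is the Claim_ definition above) =====
theorem numWrongRing_spec : Claim_equal_numWrongRing := by
  intro string _
  unfold Spec_numWrongRing
  rw [numWrongRing_eq_sum, numWrongRing_alt_eq_sum, sums_agree]
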